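-- pv_equiv track=rewrite | github.com/indralab/protmapper_paper | protmapper_paper/psp_reading_venn.py | get_venn_dict_weighted
-- ===== SOURCE A (Python) =====
-- def get_venn_dict_weighted(sites1, sites2):
--     venn_dict = {'10': 0, '01': 0, '11': 0}
--     for site, count in sites1.items():
--         if site in sites2:
--             venn_dict['11'] += count
--         else:
--             venn_dict['10'] += count
--     for site, count in sites2.items():
--         if site not in sites1:
--             venn_dict['01'] += count
--     return venn_dict
-- ===== SOURCE B (Python) =====
-- def get_venn_dict_weighted(sites1, sites2):
--     # Inclusion-exclusion: exclusive buckets are totals minus the overlap sums;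
--     # no branch-driven accumulation into '10'/'01'.
--     total1 = sum(sites1.values())
--     total2 = sum(sites2.values())
--     shared1 = sum(c for s, c in sites1.items() if s in sites2)
--     shared2 = sum(c for s, c in sites2.items() if s in sites1)
--     return {'10': total1 - shared1, '01': total2 - shared2, '11': shared1}
-- ===== Notes on version B (the rewrite author's own statement) =====
-- stated objective: alternative
-- what changed: Replaces A's branch-driven accumulation into the exclusive buckets with an inclusion-exclusion computation: total sums of each dict and the two overlap sums are computed, and the '10'/'01' buckets are obtained by subtraction (total - overlap) instead of being built up branch by branch.
import Mathlib
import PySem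

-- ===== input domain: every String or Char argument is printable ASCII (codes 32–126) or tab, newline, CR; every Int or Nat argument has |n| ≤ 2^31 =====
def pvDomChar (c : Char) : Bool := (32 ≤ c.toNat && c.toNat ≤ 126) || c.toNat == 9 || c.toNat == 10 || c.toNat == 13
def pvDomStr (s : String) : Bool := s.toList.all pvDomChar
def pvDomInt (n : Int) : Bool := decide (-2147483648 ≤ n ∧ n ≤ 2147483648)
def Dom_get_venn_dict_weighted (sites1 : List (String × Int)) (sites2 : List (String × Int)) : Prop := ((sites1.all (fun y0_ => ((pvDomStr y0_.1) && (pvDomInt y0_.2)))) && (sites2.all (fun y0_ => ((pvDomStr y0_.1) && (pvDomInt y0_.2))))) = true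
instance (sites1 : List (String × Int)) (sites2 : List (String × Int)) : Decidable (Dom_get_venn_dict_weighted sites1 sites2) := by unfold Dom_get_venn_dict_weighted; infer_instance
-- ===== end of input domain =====

-- B replaces A's branch-driven bucket accumulation by inclusion-exclusion (totals minus overlap); same cost.

-- ===== PORT A =====
-- venn_dict has the three fixed keys '10','01','11'; it is represented by its
-- three entries (v10, v01, v11), and the final dict is returned in A's key order.
def get_venn_dict_weighted (sites1 : List (String × Int)) (sites2 : List (String × Int)) : List (String × Int) :=
  let s1 := sites1.foldl (fun (acc : Int × Int × Int) p =>
    if sites2.any (fun q => q.1 == p.1) then (acc.1, acc.2.1, acc.2.2 + p.2)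
    else (acc.1 + p.2, acc.2.1, acc.2.2)) (0, 0, 0)
  let s2 := sites2.foldl (fun (acc : Int × Int × Int) p =>
    if !(sites1.any (fun q => q.1 == p.1)) then (acc.1, acc.2.1 + p.2, acc.2.2)
    else acc) s1
  [("10", s2.1), ("01", s2.2.1), ("11", s2.2.2)]

-- ===== PORT B =====
def get_venn_dict_weighted_alt (sites1 : List (String × Int)) (sites2 : List (String × Int)) : List (String × Int) :=
  let total1 := (sites1.map Prod.snd).sum
  let total2 := (sites2.map Prod.snd).sum
  let shared1 := ((sites1.filter (fun p => sites2.any (fun q => q.1 == p.1))).map Prod.snd).sum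
  let shared2 := ((sites2.filter (fun p => sites1.any (fun q => q.1 == p.1))).map Prod.snd).sum
  [("10", total1 - shared1), ("01", total2 - shared2), ("11", shared1)]

-- ===== PRECONDITION & SPEC =====
def Spec_get_venn_dict_weighted (sites1 : List (String × Int)) (sites2 : List (String × Int)) (out : List (String × Int)) : Prop := out = get_venn_dict_weighted_alt sites1 sites2
instance (sites1 : List (String × Int)) (sites2 : List (String × Int)) (out : List (String × Int)) : Decidable (Spec_get_venn_dict_weighted sites1 sites2 out) := by unfold Spec_get_venn_dict_weighted; infer_instance

-- ===== CLAIM (what is proved, stated in full; the proofs are below) =====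
def Claim_equal_get_venn_dict_weighted : Prop := ∀ (sites1 : List (String × Int)) (sites2 : List (String × Int)), Dom_get_venn_dict_weighted sites1 sites2 → Spec_get_venn_dict_weighted sites1 sites2 (get_venn_dict_weighted sites1 sites2)

-- ===== LEMMAS AND PROOFS =====

-- A's first loop: invariant over the accumulator triple.
theorem pv_loop1 (sites2 : List (String × Int)) :
    ∀ (l : List (String × Int)) (a b c : Int),
      l.foldl (fun (acc : Int × Int × Int) p =>
        if sites2.any (fun q => q.1 == p.1) then (acc.1, acc.2.1, acc.2.2 + p.2)
        else (acc.1 + p.2, acc.2.1, acc.2.2)) (a, b, c)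
      = (a + ((l.map Prod.snd).sum - ((l.filter (fun p => sites2.any (fun q => q.1 == p.1))).map Prod.snd).sum),
         b,
         c + ((l.filter (fun p => sites2.any (fun q => q.1 == p.1))).map Prod.snd).sum) := by
  intro l
  induction l with
  | nil => intro a b c; simp
  | cons x xs ih =>
    intro a b c
    by_cases h : sites2.any (fun q => q.1 == x.1) = true
    · simp [h, ih, Prod.ext_iff]
      ring
    · simp [h, ih, Prod.ext_iff]
      ring

-- A's second loop: only the middle component changes, by the not-in sum.
theorem pv_loop2 (sites1 : List (String × Int)) :
    ∀ (l : List (String × Int)) (a b c : Int),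
      l.foldl (fun (acc : Int × Int × Int) p =>
        if !(sites1.any (fun q => q.1 == p.1)) then (acc.1, acc.2.1 + p.2, acc.2.2)
        else acc) (a, b, c)
      = (a,
         b + ((l.map Prod.snd).sum - ((l.filter (fun p => sites1.any (fun q => q.1 == p.1))).map Prod.snd).sum),
         c) := by
  intro l
  induction l with
  | nil => intro a b c; simp
  | cons x xs ih =>
    intro a b c
    by_cases h : sites1.any (fun q => q.1 == x.1) = true
    · simp [h, ih]
    · simp [h, ih]
      ring

-- ===== VERDICT (by name: the statement is the Claim_ definition above) =====
theorem get_venn_dict_weighted_spec : Claim_equal_get_venn_dict_weighted := by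
  intro sites1 sites2 _
  unfold Spec_get_venn_dict_weighted get_venn_dict_weighted get_venn_dict_weighted_alt
  simp only [pv_loop1 sites2 sites1 0 0 0, pv_loop2 sites1 sites2, Int.zero_add]
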